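-- pv_equiv track=rewrite | github.com/paiv/fbhc2021 | round-1/weak-typing-1/solve.py | timmy
-- ===== SOURCE A (Python) =====
-- def timmy(W):
--     ans = 0
--     state = None
--     for x in W:
--         if (x in 'XO') and (x != state):
--             ans += 1 if state else 0
--             state = x
--     return ans
-- ===== SOURCE B (Python) =====
-- def timmy(W):
--     xo = [c for c in W if c in 'XO']
--     runs = []
--     for c in xo:
--         if not runs or runs[-1] != c:
--             runs.append(c)
--     return max(len(runs) - 1, 0)
-- ===== Notes on version B (the rewrite author's own statement) =====
-- stated objective: alternative
-- what changed: Replaces A's running state-machine accumulator with a group-then-count decomposition: filter to X/O chars, collapse consecutive equal runs, and return max(#runs - 1, 0).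
import Mathlib
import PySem

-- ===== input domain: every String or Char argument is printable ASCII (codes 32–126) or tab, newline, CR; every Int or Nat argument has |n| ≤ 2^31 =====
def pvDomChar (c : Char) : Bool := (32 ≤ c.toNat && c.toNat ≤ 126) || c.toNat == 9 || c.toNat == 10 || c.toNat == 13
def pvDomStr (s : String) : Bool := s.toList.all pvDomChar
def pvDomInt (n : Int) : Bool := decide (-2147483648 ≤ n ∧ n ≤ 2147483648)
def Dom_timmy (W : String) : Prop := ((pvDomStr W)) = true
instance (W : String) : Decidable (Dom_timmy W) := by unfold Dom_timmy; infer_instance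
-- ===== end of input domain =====

-- B replaces A's running state-machine accumulator with a group-then-count
-- decomposition (filter X/O chars, collapse consecutive runs, count runs - 1).


-- ===== PORT A =====
-- literal port of A's loop: ans accumulator, state : Option Char
def timmyLoop : List Char → Int → Option Char → Int
  | [], ans, _ => ans
  | x :: xs, ans, state =>
    if (x = 'X' ∨ x = 'O') ∧ some x ≠ state then
      timmyLoop xs (ans + if state.isSome then 1 else 0) (some x)
    else
      timmyLoop xs ans state

def timmy (W : String) : Int := timmyLoop W.toList 0 none

-- ===== PORT B =====
-- port of Source B: build the list of run representatives with a left fold, then max(len-1, 0)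
def pvRunsStep (rs : List Char) (c : Char) : List Char :=
  if rs = [] ∨ rs.getLast? ≠ some c then rs ++ [c] else rs

def timmy_alt (W : String) : Int :=
  max ((((W.toList.filter (fun c => c = 'X' || c = 'O')).foldl pvRunsStep []).length : Int) - 1) 0

-- ===== PRECONDITION & SPEC =====
def Spec_timmy (W : String) (out : Int) : Prop := out = timmy_alt W
instance (W : String) (out : Int) : Decidable (Spec_timmy W out) := by unfold Spec_timmy; infer_instance

-- ===== CLAIM (what is proved, stated in full; the proofs are below) =====
def Claim_equal_timmy : Prop := ∀ (W : String), Dom_timmy W → Spec_timmy W (timmy W)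

-- ===== LEMMAS AND PROOFS =====
theorem timmyLoop_filter (l : List Char) (ans : Int) (s : Option Char) :
    timmyLoop l ans s = timmyLoop (l.filter (fun c => c = 'X' || c = 'O')) ans s := by
  induction l generalizing ans s with
  | nil => rfl
  | cons x xs ih =>
    by_cases hx : x = 'X' ∨ x = 'O'
    · have hfx : List.filter (fun c => decide (c = 'X') || decide (c = 'O')) (x :: xs)
          = x :: List.filter (fun c => decide (c = 'X') || decide (c = 'O')) xs := by
        rcases hx with h | h <;> simp [List.filter_cons, h]
      rw [hfx]
      simp only [timmyLoop]
      split_ifs <;> exact ih _ _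
    · have hx1 : ¬ x = 'X' := fun h => hx (Or.inl h)
      have hx2 : ¬ x = 'O' := fun h => hx (Or.inr h)
      have hfx : List.filter (fun c => decide (c = 'X') || decide (c = 'O')) (x :: xs)
          = List.filter (fun c => decide (c = 'X') || decide (c = 'O')) xs := by
        simp [List.filter_cons, hx1, hx2]
      rw [hfx, timmyLoop, if_neg (fun h => hx h.1)]
      exact ih _ _

theorem foldl_step_length_le (l : List Char) (rs : List Char) :
    rs.length ≤ (l.foldl pvRunsStep rs).length := by
  induction l generalizing rs with
  | nil => simp
  | cons x xs ih =>
    simp only [List.foldl_cons]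
    unfold pvRunsStep
    split_ifs with h
    · calc rs.length ≤ (rs ++ [x]).length := by simp
        _ ≤ _ := ih _
    · exact ih _

theorem timmyLoop_some (l : List Char) (ans : Int) (c : Char) (rs : List Char)
    (hall : ∀ x ∈ l, x = 'X' ∨ x = 'O') :
    timmyLoop l ans (some c)
      = ans + ((l.foldl pvRunsStep (rs ++ [c])).length : Int) - (rs.length + 1) := by
  induction l generalizing ans c rs with
  | nil => simp [timmyLoop]
  | cons x xs ih =>
    have hlast : (rs ++ [c]).getLast? = some c := List.getLast?_concat
    by_cases hxc : x = c
    · subst hxc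
      have hno : ¬ ((x = 'X' ∨ x = 'O') ∧ some x ≠ some x) := fun h => h.2 rfl
      have hstep : pvRunsStep (rs ++ [x]) x = rs ++ [x] := by
        unfold pvRunsStep
        rw [if_neg]
        simp [hlast]
      rw [timmyLoop, if_neg hno, List.foldl_cons, hstep]
      exact ih _ _ _ (fun y hy => hall y (List.mem_cons_of_mem _ hy))
    · have hx := hall x (List.mem_cons_self)
      have hcond : (x = 'X' ∨ x = 'O') ∧ some x ≠ some c := ⟨hx, by simp [hxc]⟩
      have hstep : pvRunsStep (rs ++ [c]) x = (rs ++ [c]) ++ [x] := by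
        unfold pvRunsStep
        rw [if_pos]
        right
        simp only [hlast, ne_eq, Option.some.injEq]
        exact fun h => hxc h.symm
      rw [timmyLoop, if_pos hcond, List.foldl_cons, hstep]
      simp only [Option.isSome_some, if_true]
      rw [ih _ _ (rs ++ [c]) (fun y hy => hall y (List.mem_cons_of_mem _ hy))]
      simp only [List.length_append, List.length_cons, List.length_nil]
      push_cast; ring

theorem timmyLoop_none (l : List Char) (ans : Int)
    (hall : ∀ x ∈ l, x = 'X' ∨ x = 'O') :
    timmyLoop l ans none = ans + max (((l.foldl pvRunsStep []).length : Int) - 1) 0 := by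
  cases l with
  | nil => simp [timmyLoop]
  | cons x xs =>
    have hx := hall x (List.mem_cons_self)
    have hcond : (x = 'X' ∨ x = 'O') ∧ some x ≠ none := ⟨hx, by simp⟩
    have hstep : pvRunsStep [] x = [] ++ [x] := by unfold pvRunsStep; rw [if_pos (Or.inl rfl)]
    rw [timmyLoop, if_pos hcond, List.foldl_cons, hstep]
    simp only [Option.isSome_none, Bool.false_eq_true, if_false, add_zero]
    rw [timmyLoop_some xs ans x [] (fun y hy => hall y (List.mem_cons_of_mem _ hy))]
    have h1 : 1 ≤ (xs.foldl pvRunsStep ([] ++ [x])).length := by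
      calc (1 : Nat) = ([] ++ [x] : List Char).length := by simp
        _ ≤ _ := foldl_step_length_le _ _
    simp only [List.length_nil]
    omega

-- ===== VERDICT (by name: the statement is the Claim_ definition above) =====
theorem timmy_spec : Claim_equal_timmy := by
  intro W _
  unfold Spec_timmy timmy timmy_alt
  rw [timmyLoop_filter]
  rw [timmyLoop_none _ _ (by
    intro x hx
    have := List.of_mem_filter hx
    simpa using this)]
  simp
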